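-- pv_equiv track=rewrite | github.com/MC-and-his-Agents/Syvert | .loom/bin/loom_flow.py | path_matches_owned_roots
-- ===== SOURCE A (Python) =====
-- def path_matches_owned_roots(path: str, roots: tuple[str, ...]) -> bool:
--     normalized = path.rstrip("/")
--     for root in roots:
--         owned_root = root.rstrip("/")
--         if normalized == owned_root:
--             return True
--         if normalized.startswith(f"{owned_root}/"):
--             return True
--     return False
-- ===== SOURCE B (Python) =====
-- def path_matches_owned_roots(path: str, roots: tuple[str, ...]) -> bool:
--     path_parts = path.rstrip("/").split("/")
--     for root in roots:
--         root_parts = root.rstrip("/").split("/")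
--         if path_parts[:len(root_parts)] == root_parts:
--             return True
--     return False
-- ===== Notes on version B (the rewrite author's own statement) =====
-- stated objective: alternative
-- what changed: Replaces A's two per-root string tests (exact equality plus startswith(root+'/')) with a single list-prefix comparison on '/'-split components: the path is split once, each root is split, and one take/compare decides both cases.
import Mathlib
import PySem

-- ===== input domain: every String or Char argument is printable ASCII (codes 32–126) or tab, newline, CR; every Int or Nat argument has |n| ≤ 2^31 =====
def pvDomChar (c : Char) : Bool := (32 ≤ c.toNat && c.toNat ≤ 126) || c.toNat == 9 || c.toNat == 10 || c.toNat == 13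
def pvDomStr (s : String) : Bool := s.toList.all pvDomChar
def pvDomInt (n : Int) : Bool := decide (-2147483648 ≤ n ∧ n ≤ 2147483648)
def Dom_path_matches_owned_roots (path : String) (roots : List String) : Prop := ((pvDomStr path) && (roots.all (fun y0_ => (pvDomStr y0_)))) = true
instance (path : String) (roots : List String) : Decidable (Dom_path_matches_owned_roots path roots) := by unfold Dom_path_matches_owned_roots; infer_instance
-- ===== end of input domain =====

-- B decides "path equals a root or lies under it" by one list-prefix comparison of
-- '/'-split components instead of A's pair of string tests (equality + startswith);
-- objective: alternative decomposition, same cost.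

-- hand port of Python's s.rstrip("/") (PySem has no right-only strip-with-chars):
-- exact — drops exactly the trailing '/' characters.
def pvRstripSlash (s : List Char) : List Char :=
  (s.reverse.dropWhile (· == '/')).reverse

-- ===== PORT A =====
-- the for-loop with its two early returns, one root at a time
def pathA_go (normalized : List Char) : List String → Bool
  | [] => false
  | root :: rest =>
    let owned_root := pvRstripSlash root.toList
    if normalized == owned_root then true
    else if PySem.Chars.startswith normalized (owned_root ++ ['/']) then true
    else pathA_go normalized rest

def path_matches_owned_roots (path : String) (roots : List String) : Bool :=
  let normalized := pvRstripSlash path.toList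
  pathA_go normalized roots

-- ===== PORT B =====
def path_matches_owned_roots_alt (path : String) (roots : List String) : Bool :=
  let path_parts := PySem.Chars.splitOn (pvRstripSlash path.toList) ['/']
  roots.any fun root =>
    let root_parts := PySem.Chars.splitOn (pvRstripSlash root.toList) ['/']
    path_parts.take root_parts.length == root_parts

-- ===== PRECONDITION & SPEC =====
def Spec_path_matches_owned_roots (path : String) (roots : List String) (out : Bool) : Prop := out = path_matches_owned_roots_alt path roots
instance (path : String) (roots : List String) (out : Bool) : Decidable (Spec_path_matches_owned_roots path roots out) := by unfold Spec_path_matches_owned_roots; infer_instance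

-- ===== CLAIM (what is proved, stated in full; the proofs are below) =====
def Claim_equal_path_matches_owned_roots : Prop := ∀ (path : String) (roots : List String), Dom_path_matches_owned_roots path roots → Spec_path_matches_owned_roots path roots (path_matches_owned_roots path roots)

-- ===== LEMMAS AND PROOFS =====

-- simple structural model of s.split('/')
def sps : List Char → List (List Char)
  | [] => [[]]
  | c :: rest => if c = '/' then [] :: sps rest else (sps rest).modifyHead (c :: ·)

theorem sps_ne_nil (s : List Char) : sps s ≠ [] := by
  cases s with
  | nil => simp [sps]
  | cons c rest =>
    simp only [sps]
    split_ifs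
    · simp
    · cases h : sps rest with
      | nil => exact absurd h (sps_ne_nil rest)
      | cons a t => simp [List.modifyHead]

theorem splitOn_go_single (fuel : Nat) (l cur : List Char) (acc : List (List Char))
    (h : l.length < fuel) :
    PySem.Chars.splitOn.go ['/'] fuel l cur acc
      = acc.reverse ++ (sps l).modifyHead (cur.reverse ++ ·) := by
  induction fuel generalizing l cur acc with
  | zero => omega
  | succ fuel ih =>
    cases l with
    | nil =>
      simp [PySem.Chars.splitOn.go, sps]
    | cons c rest =>
      by_cases hc : c = '/'
      · subst hc
        have hp : List.isPrefixOf ['/'] ('/' :: rest) = true := by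
          simp [List.isPrefixOf]
        rw [PySem.Chars.splitOn.go]
        simp only [hp, if_true]
        have h2 := ih rest [] (cur.reverse :: acc) (by simpa using Nat.lt_of_succ_lt_succ h)
        simp only [List.length_cons, List.length_nil, List.drop_succ_cons, List.drop_zero,
          Nat.zero_add] at h2 ⊢
        rw [h2]
        have hid : (sps rest).modifyHead (fun x => List.reverse ([] : List Char) ++ x)
            = sps rest := by
          cases sps rest <;> simp [List.modifyHead]
        rw [hid]
        simp [sps, List.modifyHead]
      · have hp : List.isPrefixOf ['/'] (c :: rest) = false := by
          simp only [List.isPrefixOf, Bool.and_eq_false_iff, beq_eq_false_iff_ne, ne_eq]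
          exact Or.inl (fun h => hc h.symm)
        rw [PySem.Chars.splitOn.go]
        simp only [hp, Bool.false_eq_true, if_false]
        have h2 := ih rest (c :: cur) acc (by simpa using Nat.lt_of_succ_lt_succ h)
        rw [h2]
        simp only [sps, hc, if_false]
        cases hs : sps rest with
        | nil => exact absurd hs (sps_ne_nil rest)
        | cons a t => simp [List.modifyHead]

theorem splitOn_eq_sps (s : List Char) :
    PySem.Chars.splitOn s ['/'] = sps s := by
  unfold PySem.Chars.splitOn
  rw [splitOn_go_single (s.length + 1) s [] [] (by omega)]
  cases hs : sps s with
  | nil => exact absurd hs (sps_ne_nil s)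
  | cons a t => simp [List.modifyHead]

-- head of the split = the chunk before the first '/'
theorem sps_head_eq_nil_iff (n : List Char) :
    (∃ t, sps n = [] :: t) ↔ (n = [] ∨ ['/'] <+: n) := by
  cases n with
  | nil => simp [sps]
  | cons d n' =>
    by_cases hd : d = '/'
    · subst hd
      simp only [sps, if_true]
      constructor
      · intro _; right; exact ⟨n', rfl⟩
      · intro _; exact ⟨sps n', rfl⟩
    · simp only [sps, hd, if_false]
      constructor
      · rintro ⟨t, ht⟩
        cases hs : sps n' with
        | nil => exact absurd hs (sps_ne_nil n')
        | cons a u => rw [hs] at ht; simp [List.modifyHead] at ht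
      · rintro (h | ⟨t, ht⟩)
        · exact absurd h (by simp)
        · cases ht; simp at hd

-- THE key characterisation: the component-prefix test of B equals A's "equal or under" test
theorem sps_take_prefix_iff (o : List Char) : ∀ n : List Char,
    ((sps n).take (sps o).length = sps o) ↔ (n = o ∨ o ++ ['/'] <+: n) := by
  induction o with
  | nil =>
    intro n
    simp only [sps, List.length_cons, List.length_nil, Nat.zero_add, List.nil_append]
    cases hs : sps n with
    | nil => exact absurd hs (sps_ne_nil n)
    | cons a t =>
      simp only [List.take_succ_cons, List.take_zero]
      constructor
      · intro h
        have ha : a = [] := by simpa using h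
        exact (sps_head_eq_nil_iff n).mp ⟨t, by rw [hs, ha]⟩
      · intro h
        obtain ⟨t', ht'⟩ := (sps_head_eq_nil_iff n).mpr h
        rw [hs] at ht'
        simp_all
  | cons c o' ih =>
    intro n
    by_cases hc : c = '/'
    · subst hc
      simp only [sps, if_true]
      cases n with
      | nil =>
        cases hs' : sps o' with
        | nil => exact absurd hs' (sps_ne_nil o')
        | cons b v =>
          simp [sps]
      | cons d n' =>
        by_cases hd : d = '/'
        · subst hd
          simp only [sps, if_true, List.length_cons, List.take_succ_cons, List.cons.injEq,
            List.cons_append, List.cons_prefix_cons, true_and]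
          exact ih n'
        · simp only [sps, hd, if_false]
          cases hs : sps n' with
          | nil => exact absurd hs (sps_ne_nil n')
          | cons a u =>
            simp only [List.modifyHead, List.length_cons, List.take_succ_cons,
              List.cons.injEq, List.cons_append, List.cons_prefix_cons]
            constructor
            · rintro ⟨h1, _⟩; simp at h1
            · rintro (⟨h1, _⟩ | ⟨h1, _⟩)
              · exact absurd h1 hd
              · exact absurd h1.symm hd
    · simp only [sps, hc, if_false]
      cases hs' : sps o' with
      | nil => exact absurd hs' (sps_ne_nil o')
      | cons b v =>
        cases n with
        | nil =>
          simp only [sps, List.modifyHead, List.length_cons, List.take_succ_cons,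
            List.take_nil]
          constructor
          · intro h; simp at h
          · rintro (h | ⟨t, ht⟩) <;> simp_all
        | cons d n' =>
          by_cases hd : d = '/'
          · subst hd
            simp only [sps, if_true, List.modifyHead, List.length_cons,
              List.take_succ_cons, List.cons.injEq, List.cons_append, List.cons_prefix_cons]
            constructor
            · rintro ⟨h1, _⟩; simp at h1
            · rintro (⟨h1, _⟩ | ⟨h1, _⟩)
              · exact absurd h1.symm hc
              · exact absurd h1 hc
          · cases hs : sps n' with
            | nil => exact absurd hs (sps_ne_nil n')
            | cons a u =>
              by_cases hdc : d = c
              · subst hdc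
                simp only [sps, hd, if_false, hs, List.modifyHead, List.length_cons,
                  List.take_succ_cons, List.cons.injEq, List.cons_append,
                  List.cons_prefix_cons, true_and]
                have key := ih n'
                rw [hs, hs'] at key
                simp only [List.length_cons, List.take_succ_cons, List.cons.injEq] at key
                exact key
              · simp only [sps, hd, if_false, hs, List.modifyHead, List.length_cons,
                  List.take_succ_cons, List.cons.injEq, List.cons_append,
                  List.cons_prefix_cons]
                constructor
                · rintro ⟨⟨h1, _⟩, _⟩; exact absurd h1 hdc
                · rintro (⟨h1, _⟩ | ⟨h1, _⟩)
                  · exact absurd h1 hdc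
                  · exact absurd h1.symm hdc

-- per-root agreement of the two tests
theorem per_root_eq (n o : List Char) :
    ((PySem.Chars.splitOn n ['/']).take (PySem.Chars.splitOn o ['/']).length
        == PySem.Chars.splitOn o ['/'])
      = (if n == o then true
         else if PySem.Chars.startswith n (o ++ ['/']) then true else false) := by
  rw [splitOn_eq_sps, splitOn_eq_sps]
  by_cases h : (sps n).take (sps o).length = sps o
  · have := (sps_take_prefix_iff o n).mp h
    rcases this with h' | h'
    · simp [h']
    · rw [beq_iff_eq.mpr h]
      by_cases hno : n = o
      · simp [hno]
      · have : PySem.Chars.startswith n (o ++ ['/']) = true :=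
          (PySem.Chars.startswith_iff n (o ++ ['/'])).mpr h'
        simp [hno, this]
  · have hne : ¬ (n = o ∨ o ++ ['/'] <+: n) := fun hc => h ((sps_take_prefix_iff o n).mpr hc)
    rw [not_or] at hne
    obtain ⟨hne1, hne2⟩ := hne
    have hsw : PySem.Chars.startswith n (o ++ ['/']) = false := by
      rw [← Bool.not_eq_true, PySem.Chars.startswith_iff]
      exact hne2
    simp [h, hne1, hsw]

theorem loop_eq (normalized : List Char) (roots : List String) :
    pathA_go normalized roots
      = roots.any (fun root =>
          (PySem.Chars.splitOn normalized ['/']).take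
              (PySem.Chars.splitOn (pvRstripSlash root.toList) ['/']).length
            == PySem.Chars.splitOn (pvRstripSlash root.toList) ['/']) := by
  induction roots with
  | nil => simp [pathA_go]
  | cons root rest ih =>
    simp only [pathA_go, List.any_cons]
    rw [per_root_eq normalized (pvRstripSlash root.toList)]
    split_ifs with h1 h2 <;> simp_all

-- ===== VERDICT (by name: the statement is the Claim_ definition above) =====
theorem path_matches_owned_roots_spec : Claim_equal_path_matches_owned_roots := by
  intro path roots _
  unfold Spec_path_matches_owned_roots path_matches_owned_roots path_matches_owned_roots_alt
  simp only
  rw [loop_eq]
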